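-- pv_equiv track=rewrite | github.com/pypi-data/pypi-mirror-385 | packages/imas-mcp/imas_mcp-3.0.1-py3-none-any.whl/imas_mcp/structure/structure_analyzer.py | _identify_common_patterns
-- ===== SOURCE A (Python) =====
-- from typing import Any
--
-- def _identify_common_patterns(paths: dict[str, Any]) -> list[str]:
--     """Identify common structural patterns in paths."""
--     patterns = []
--
--     # Look for time series patterns
--     time_paths = [path for path in paths.keys() if "time" in path.lower()]
--     if time_paths:
--         patterns.append("Time series data structure detected")
--
--     # Look for profile patterns
--     profile_paths = [path for path in paths.keys() if "profiles" in path.lower()]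
--     if profile_paths:
--         patterns.append("Profile data organization present")
--
--     # Look for coordinate patterns
--     coord_paths = [
--         path
--         for path in paths.keys()
--         if any(coord in path for coord in ["1d", "2d", "3d"])
--     ]
--     if coord_paths:
--         patterns.append("Multi-dimensional coordinate organization")
--
--     # Look for array patterns
--     array_paths = [path for path in paths.keys() if "[]" in path or "_" in path]
--     if array_paths:
--         patterns.append("Array and indexed data structures")
--
--     return patterns
-- ===== SOURCE B (Python) =====
-- def _identify_common_patterns(paths):
--     """Identify common structural patterns in paths (single pass over keys)."""
--     has_time = has_profile = has_coord = has_array = False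
--     for path in paths.keys():
--         path_lower = path.lower()
--         has_time = has_time or "time" in path_lower
--         has_profile = has_profile or "profiles" in path_lower
--         has_coord = has_coord or "1d" in path or "2d" in path or "3d" in path
--         has_array = has_array or "[]" in path or "_" in path
--     patterns = []
--     if has_time:
--         patterns.append("Time series data structure detected")
--     if has_profile:
--         patterns.append("Profile data organization present")
--     if has_coord:
--         patterns.append("Multi-dimensional coordinate organization")
--     if has_array:
--         patterns.append("Array and indexed data structures")
--     return patterns
-- ===== Notes on version B (the rewrite author's own statement) =====
-- stated objective: faster
-- what changed: Replaces A's four separate comprehension scans over paths.keys() (each building a throwaway list) with one loop that maintains four boolean flags, then emits the four messages in the fixed order.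
import Mathlib
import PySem

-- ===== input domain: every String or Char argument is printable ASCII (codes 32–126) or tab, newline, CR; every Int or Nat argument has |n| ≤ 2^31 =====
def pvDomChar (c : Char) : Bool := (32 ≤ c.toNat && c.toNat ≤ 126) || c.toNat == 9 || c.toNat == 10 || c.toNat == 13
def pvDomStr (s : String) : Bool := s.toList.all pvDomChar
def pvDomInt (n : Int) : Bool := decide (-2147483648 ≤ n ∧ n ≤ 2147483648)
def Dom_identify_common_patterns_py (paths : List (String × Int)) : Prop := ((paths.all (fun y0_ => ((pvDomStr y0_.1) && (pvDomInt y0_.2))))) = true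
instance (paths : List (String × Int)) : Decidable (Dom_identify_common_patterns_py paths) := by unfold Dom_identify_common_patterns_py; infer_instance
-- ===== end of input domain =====

-- B replaces A's four separate key-scans with one single pass maintaining four boolean flags (same output, fewer traversals and no intermediate lists).


-- ===== PORT A =====
def identify_common_patterns_py (paths : List (String × Int)) : List String :=
  let keys := (PySem.Dict.mk paths).keys
  let patterns : List String := []
  let time_paths := keys.filter (fun path => PySem.Str.isIn "time" (PySem.Str.lower path))
  let patterns := if !time_paths.isEmpty then patterns ++ ["Time series data structure detected"] else patterns
  let profile_paths := keys.filter (fun path => PySem.Str.isIn "profiles" (PySem.Str.lower path))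
  let patterns := if !profile_paths.isEmpty then patterns ++ ["Profile data organization present"] else patterns
  let coord_paths := keys.filter (fun path => (["1d", "2d", "3d"].any (fun coord => PySem.Str.isIn coord path)))
  let patterns := if !coord_paths.isEmpty then patterns ++ ["Multi-dimensional coordinate organization"] else patterns
  let array_paths := keys.filter (fun path => PySem.Str.isIn "[]" path || PySem.Str.isIn "_" path)
  let patterns := if !array_paths.isEmpty then patterns ++ ["Array and indexed data structures"] else patterns
  patterns

-- ===== PORT B =====
-- one pass over the keys, maintaining four boolean flags
def identify_common_patterns_py_alt (paths : List (String × Int)) : List String :=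
  let flags := (PySem.Dict.mk paths).keys.foldl
    (fun (f : Bool × Bool × Bool × Bool) path =>
      let path_lower := PySem.Str.lower path
      (f.1 || PySem.Str.isIn "time" path_lower,
       f.2.1 || PySem.Str.isIn "profiles" path_lower,
       f.2.2.1 || PySem.Str.isIn "1d" path || PySem.Str.isIn "2d" path || PySem.Str.isIn "3d" path,
       f.2.2.2 || PySem.Str.isIn "[]" path || PySem.Str.isIn "_" path))
    (false, false, false, false)
  (if flags.1 then ["Time series data structure detected"] else []) ++
  (if flags.2.1 then ["Profile data organization present"] else []) ++
  (if flags.2.2.1 then ["Multi-dimensional coordinate organization"] else []) ++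
  (if flags.2.2.2 then ["Array and indexed data structures"] else [])

-- ===== PRECONDITION & SPEC =====
def Spec_identify_common_patterns_py (paths : List (String × Int)) (out : List String) : Prop := out = identify_common_patterns_py_alt paths
instance (paths : List (String × Int)) (out : List String) : Decidable (Spec_identify_common_patterns_py paths out) := by unfold Spec_identify_common_patterns_py; infer_instance

-- ===== CLAIM (what is proved, stated in full; the proofs are below) =====
def Claim_equal_identify_common_patterns_py : Prop := ∀ (paths : List (String × Int)), Dom_identify_common_patterns_py paths → Spec_identify_common_patterns_py paths (identify_common_patterns_py paths)

-- ===== LEMMAS AND PROOFS =====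

-- the flag-accumulating fold computes the four 'any's
theorem pv_flags_foldl (l : List String) (a b c d : Bool) :
    l.foldl
      (fun (f : Bool × Bool × Bool × Bool) path =>
        let path_lower := PySem.Str.lower path
        (f.1 || PySem.Str.isIn "time" path_lower,
         f.2.1 || PySem.Str.isIn "profiles" path_lower,
         f.2.2.1 || PySem.Str.isIn "1d" path || PySem.Str.isIn "2d" path || PySem.Str.isIn "3d" path,
         f.2.2.2 || PySem.Str.isIn "[]" path || PySem.Str.isIn "_" path))
      (a, b, c, d)
    = (a || l.any (fun path => PySem.Str.isIn "time" (PySem.Str.lower path)),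
       b || l.any (fun path => PySem.Str.isIn "profiles" (PySem.Str.lower path)),
       c || l.any (fun path => PySem.Str.isIn "1d" path || PySem.Str.isIn "2d" path || PySem.Str.isIn "3d" path),
       d || l.any (fun path => PySem.Str.isIn "[]" path || PySem.Str.isIn "_" path)) := by
  induction l generalizing a b c d with
  | nil => simp
  | cons x xs ih =>
    rw [List.foldl_cons]
    rw [ih]
    simp [Bool.or_assoc]

theorem pv_filter_isEmpty {α : Type} (p : α → Bool) (l : List α) :
    (l.filter p).isEmpty = !(l.any p) := by
  induction l with
  | nil => rfl
  | cons x xs ih =>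
    by_cases h : p x <;> simp [h, ih]

-- ===== VERDICT (by name: the statement is the Claim_ definition above) =====
theorem identify_common_patterns_py_spec : Claim_equal_identify_common_patterns_py := by
  intro paths _
  unfold Spec_identify_common_patterns_py identify_common_patterns_py identify_common_patterns_py_alt
  rw [pv_flags_foldl]
  simp only [pv_filter_isEmpty, Bool.not_not, Bool.false_or, List.any_cons, List.any_nil,
    Bool.or_false, Bool.or_assoc]
  set l := (PySem.Dict.mk paths).keys
  rcases Bool.eq_false_or_eq_true (l.any (fun path => PySem.Str.isIn "time" (PySem.Str.lower path))) with h1 | h1 <;>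
  rcases Bool.eq_false_or_eq_true (l.any (fun path => PySem.Str.isIn "profiles" (PySem.Str.lower path))) with h2 | h2 <;>
  rcases Bool.eq_false_or_eq_true (l.any (fun path => PySem.Str.isIn "1d" path || (PySem.Str.isIn "2d" path || PySem.Str.isIn "3d" path))) with h3 | h3 <;>
  rcases Bool.eq_false_or_eq_true (l.any (fun path => PySem.Str.isIn "[]" path || PySem.Str.isIn "_" path)) with h4 | h4 <;>
  simp only [h1, h2, h3, h4] <;> simp
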